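-- pv_equiv track=rewrite | github.com/blzzua/codewars | 6-kyu/complete_the_pattern_14.py | pattern
-- ===== SOURCE A (Python) =====
-- def wavegen(n,m):
--     i, grow = 0, 1
--     while m > 0:
--         if grow:
--             if i < n:
--                 i += 1
--             else:
--                 grow = 1 - grow
--                 continue
--         else:
--             if i >= 2:
--                 i -= 1
--             else:
--                 grow= 1 - grow
--                 m -= 1
--                 continue
--         yield i
--
-- def pattern(n, y=1, *args):
--     res = []
--     y = max(y,1)
--     for j in wavegen(n,y):
--         i = j - 1
--         line = [' '] * ( 2 * n - 1)
--         char = str((i+1) % 10)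
--         line[i], line[-i-1] = char, char
--         res.append(''.join(line))
--     return '\n'.join(res)
-- ===== SOURCE B (Python) =====
-- def pattern(n, y=1, *args):
--     # Explicit triangle-wave index list instead of A's stateful generator;
--     # rows built by direct string concatenation instead of list mutation.
--     up = list(range(1, n + 1))
--     down = list(range(n - 1, 0, -1))
--     js = up + down + (max(y, 1) - 1) * (list(range(2, n + 1)) + down)
--     w = 2 * n - 1
--
--     def row(j):
--         i = j - 1
--         c = str(j % 10)
--         if i < w - i - 1:
--             return ' ' * i + c + ' ' * (w - 2 * i - 2) + c + ' ' * i
--         return ' ' * i + c + ' ' * i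
--
--     return '\n'.join(row(j) for j in js)
-- ===== Notes on version B (the rewrite author's own statement) =====
-- stated objective: simpler
-- what changed: B replaces A's stateful while-loop generator by explicitly concatenating the ascending/descending index ranges (triangle wave) and builds each row by direct string concatenation instead of mutating a list of 2n-1 cells.
import Mathlib
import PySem

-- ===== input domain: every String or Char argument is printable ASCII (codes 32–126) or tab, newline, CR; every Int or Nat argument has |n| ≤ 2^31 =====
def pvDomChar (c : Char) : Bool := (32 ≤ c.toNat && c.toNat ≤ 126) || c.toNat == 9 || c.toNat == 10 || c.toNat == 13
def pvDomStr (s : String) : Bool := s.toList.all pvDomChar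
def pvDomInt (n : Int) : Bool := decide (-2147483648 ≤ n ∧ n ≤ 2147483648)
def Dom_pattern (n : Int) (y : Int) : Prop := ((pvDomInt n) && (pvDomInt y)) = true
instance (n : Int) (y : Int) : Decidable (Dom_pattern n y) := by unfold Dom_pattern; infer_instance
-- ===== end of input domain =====

-- B replaces A's stateful wave generator by an explicitly concatenated triangle-wave index list
-- and builds each row by string concatenation instead of list mutation (same return value).

-- ===== PORT A =====
-- A's generator wavegen(n, m), state (i, grow, m).  Python's flag 'grow' only ever holds 0 or 1
-- (it starts at 1 and is only changed by 'grow = 1 - grow'), so it is ported as a Bool.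
def wavegenA (n : Int) (i : Int) (grow : Bool) (m : Int) : List Int :=
  if _h : 0 < m then
    match grow with
    | true =>
      if _hi : i < n then (i + 1) :: wavegenA n (i + 1) true m
      else wavegenA n i false m
    | false =>
      if _hi : 2 ≤ i then (i - 1) :: wavegenA n (i - 1) false m
      else wavegenA n i true (m - 1)
  else []
termination_by (m.toNat, (if grow then 1 else 0), (if grow then (n - i).toNat else (i - 1).toNat))
decreasing_by
  · exact Prod.Lex.right _ (Prod.Lex.right _ (by simp; omega))
  · exact Prod.Lex.right _ (Prod.Lex.left _ _ (by simp))
  · exact Prod.Lex.right _ (Prod.Lex.right _ (by simp; omega))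
  · exact Prod.Lex.left _ _ (by omega)

-- A's loop body: i = j-1; line = [' ']*(2n-1); char = str((i+1)%10);
-- line[i], line[-i-1] = char, char; ''.join(line).
-- (pySetD is exact where Python's line[...] = char succeeds; at every call site j ∈ [1, n],
-- so both indices are in range and Python never raises.)
def rowA (n : Int) (j : Int) : String :=
  let i := j - 1
  let line : List String := List.replicate (2 * n - 1).toNat " "
  let ch := PySem.Int.toStr (PySem.Int.mod (i + 1) 10)
  let line := PySem.List.pySetD line i ch
  let line := PySem.List.pySetD line (-i - 1) ch
  PySem.Str.join "" line

def pattern (n : Int) (y : Int) : String :=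
  let y' := max y 1
  let res : List String := (wavegenA n 0 true y').foldl (fun res j => res ++ [rowA n j]) []
  PySem.Str.join "\n" res

-- ===== PORT B =====
-- ' ' * k  (Python clamps a negative count to the empty string, as .toNat does)
def spacesB (k : Int) : List Char := List.replicate k.toNat ' '

-- B's row(j): plain string concatenation (built as the code-point list, then packed).
def rowB (n : Int) (j : Int) : String :=
  let i := j - 1
  let w := 2 * n - 1
  let c : List Char := PySem.Int.toChars (PySem.Int.mod j 10)
  String.ofList
    (if i < w - i - 1 then
      spacesB i ++ c ++ spacesB (w - 2 * i - 2) ++ c ++ spacesB i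
    else
      spacesB i ++ c ++ spacesB i)

def pattern_alt (n : Int) (y : Int) : String :=
  let up := PySem.List.pyRange 1 (n + 1) 1
  let down := PySem.List.pyRange (n - 1) 0 (-1)
  let js := up ++ down ++ PySem.List.pyRepeat (PySem.List.pyRange 2 (n + 1) 1 ++ down) (max y 1 - 1)
  PySem.Str.join "\n" (js.map (rowB n))

-- ===== PRECONDITION & SPEC =====
def Spec_pattern (n : Int) (y : Int) (out : String) : Prop := out = pattern_alt n y
instance (n : Int) (y : Int) (out : String) : Decidable (Spec_pattern n y out) := by unfold Spec_pattern; infer_instance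

-- ===== CLAIM (what is proved, stated in full; the proofs are below) =====
def Claim_equal_pattern : Prop := ∀ (n : Int) (y : Int), Dom_pattern n y → Spec_pattern n y (pattern n y)

-- ===== LEMMAS AND PROOFS =====

-- the append-loop is the map
theorem foldl_append_singleton (f : Int → String) :
    ∀ (l : List Int) (acc : List String), l.foldl (fun r j => r ++ [f j]) acc = acc ++ l.map f := by
  intro l
  induction l with
  | nil => simp
  | cons x xs ih => intro acc; simp [List.foldl_cons, ih]

theorem join_nil_flatten : ∀ (xss : List (List Char)), PySem.Chars.join [] xss = xss.flatten := by
  intro xss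
  induction xss with
  | nil => simp [PySem.Chars.join_nil]
  | cons p rest ih =>
    cases rest with
    | nil => simp [PySem.Chars.join_singleton]
    | cons q r => simp [PySem.Chars.join_cons_cons, ih]

theorem rep_set {α : Type} (x v : α) :
    ∀ (p q : Nat), (List.replicate (p + 1 + q) x).set p v = List.replicate p x ++ v :: List.replicate q x := by
  intro p
  induction p with
  | zero =>
    intro q
    rw [show 1 + q = q + 1 by omega, List.replicate_succ]
    simp
  | succ p ih =>
    intro q
    have : p + 1 + 1 + q = (p + 1 + q) + 1 := by omega
    rw [this, List.replicate_succ, List.set_cons_succ, ih, List.replicate_succ]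
    simp

-- ascent: from (i, grow=1, m) with i ≤ n the generator yields i+1, …, n and reaches (n, grow=0, m)
theorem wg_asc (n : Int) : ∀ (k : Nat) (i m : Int), (n - i).toNat = k → 0 < m → i ≤ n →
    wavegenA n i true m = PySem.List.pyRange (i + 1) (n + 1) 1 ++ wavegenA n n false m := by
  intro k
  induction k with
  | zero =>
    intro i m hk hm hi
    have hin : i = n := by omega
    subst hin
    conv_lhs => rw [wavegenA, dif_pos hm]
    simp [PySem.List.pyRange_one_eq_nil (by omega : n + 1 ≤ n + 1)]
  | succ k ih =>
    intro i m hk hm hi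
    have hlt : i < n := by omega
    conv_lhs => rw [wavegenA, dif_pos hm]
    simp only [hlt, dif_pos]
    rw [ih (i + 1) m (by omega) hm (by omega)]
    rw [PySem.List.pyRange_one_cons (by omega : i + 1 < n + 1)]
    simp

-- descent: from (i, grow=0, m) with i ≥ 1 the generator yields i-1, …, 1 and reaches (1, grow=1, m-1)
theorem wg_desc (n : Int) : ∀ (k : Nat) (i m : Int), (i - 1).toNat = k → 0 < m → 1 ≤ i →
    wavegenA n i false m = PySem.List.pyRange (i - 1) 0 (-1) ++ wavegenA n 1 true (m - 1) := by
  intro k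
  induction k with
  | zero =>
    intro i m hk hm hi
    have : i = 1 := by omega
    subst this
    conv_lhs => rw [wavegenA, dif_pos hm]
    simp
  | succ k ih =>
    intro i m hk hm hi
    have h2 : 2 ≤ i := by omega
    conv_lhs => rw [wavegenA, dif_pos hm]
    simp only [h2, dif_pos]
    rw [ih (i - 1) m (by omega) hm (by omega)]
    rw [PySem.List.pyRange_neg_one_cons (by omega : (0:Int) < i - 1)]
    simp

-- each further sweep from (1, grow=1, m) yields one full cycle 2 … n n-1 … 1
theorem wg_cyc (n : Int) (hn : 1 ≤ n) : ∀ (k : Nat) (m : Int), m.toNat = k →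
    wavegenA n 1 true m =
      PySem.List.pyRepeat (PySem.List.pyRange 2 (n + 1) 1 ++ PySem.List.pyRange (n - 1) 0 (-1)) m := by
  intro k
  induction k with
  | zero =>
    intro m hk
    have hm : ¬ 0 < m := by omega
    conv_lhs => rw [wavegenA, dif_neg hm]
    simp [PySem.List.pyRepeat, show m.toNat = 0 from hk]
  | succ k ih =>
    intro m hk
    have hm : 0 < m := by omega
    rw [wg_asc n (n - 1).toNat 1 m (by omega) hm hn]
    rw [wg_desc n (n - 1).toNat n m (by omega) hm (by omega)]
    rw [ih (m - 1) (by omega)]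
    have : m.toNat = k + 1 := hk
    simp [PySem.List.pyRepeat, this, List.replicate_succ]

-- degenerate n ≤ 0: the generator yields nothing
theorem wg_neg (n : Int) (hn : n ≤ 0) : ∀ (k : Nat) (m : Int), m.toNat = k →
    wavegenA n 0 true m = [] := by
  intro k
  induction k with
  | zero =>
    intro m hk
    conv_lhs => rw [wavegenA, dif_neg (by omega : ¬ 0 < m)]
  | succ k ih =>
    intro m hk
    have hm : 0 < m := by omega
    conv_lhs => rw [wavegenA, dif_pos hm]
    simp only [show ¬ (0:Int) < n by omega, dif_neg, not_false_iff]
    conv_lhs => rw [wavegenA, dif_pos hm]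
    simp only [show ¬ (2:Int) ≤ 0 by omega, dif_neg, not_false_iff]
    exact ih (m - 1) (by omega)

-- the whole yielded index list equals B's concatenated triangle wave
theorem wave_eq (n : Int) (m : Int) (hm : 1 ≤ m) :
    wavegenA n 0 true m =
      PySem.List.pyRange 1 (n + 1) 1 ++ PySem.List.pyRange (n - 1) 0 (-1) ++
        PySem.List.pyRepeat (PySem.List.pyRange 2 (n + 1) 1 ++ PySem.List.pyRange (n - 1) 0 (-1)) (m - 1) := by
  by_cases hn : 1 ≤ n
  · rw [wg_asc n n.toNat 0 m (by omega) (by omega) (by omega)]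
    rw [wg_desc n (n - 1).toNat n m (by omega) (by omega) (by omega)]
    rw [wg_cyc n hn (m - 1).toNat (m - 1) rfl]
    simp
  · have h1 : PySem.List.pyRange 1 (n + 1) 1 = [] := PySem.List.pyRange_one_eq_nil (by omega)
    have h2 : PySem.List.pyRange (n - 1) 0 (-1) = [] := PySem.List.pyRange_neg_one_eq_nil (by omega)
    have h3 : PySem.List.pyRange 2 (n + 1) 1 = [] := PySem.List.pyRange_one_eq_nil (by omega)
    rw [wg_neg n (by omega) m.toNat m rfl, h1, h2, h3]
    simp [PySem.List.pyRepeat]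

-- every yielded index lies in [1, n]
theorem wave_mem (n m j : Int) (hm : 1 ≤ m) (hj : j ∈ wavegenA n 0 true m) : 1 ≤ j ∧ j ≤ n := by
  rw [wave_eq n m hm] at hj
  simp only [List.mem_append, PySem.List.pyRepeat, List.mem_flatten] at hj
  rcases hj with (hj | hj) | ⟨l, hl, hj⟩
  · rw [PySem.List.mem_pyRange_one] at hj; omega
  · rw [PySem.List.mem_pyRange_neg_one] at hj; omega
  · have := List.eq_of_mem_replicate hl
    subst this
    rcases List.mem_append.mp hj with hj | hj
    · rw [PySem.List.mem_pyRange_one] at hj; omega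
    · rw [PySem.List.mem_pyRange_neg_one] at hj; omega

-- the two row builders agree on every index the wave yields
theorem row_eq (n j : Int) (h1 : 1 ≤ j) (h2 : j ≤ n) : rowA n j = rowB n j := by
  unfold rowA rowB spacesB
  simp only [show j - 1 + 1 = j from by omega]
  have hL : (1:Int) ≤ 2 * n - 1 := by omega
  -- abbreviations
  generalize hc : PySem.Int.toStr (PySem.Int.mod j 10) = c
  have hctl : c.toList = PySem.Int.toChars (PySem.Int.mod j 10) := by
    rw [← hc]; exact PySem.Int.toList_toStr _
  -- first assignment: nonnegative index
  rw [PySem.List.pySetD_of_nonneg _ _ (by omega : (0:Int) ≤ j - 1)]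
  -- second assignment: negative index -i-1 normalises to length - (i+1)
  have hlen : ((List.replicate (2 * n - 1).toNat " ").set (j - 1).toNat c).length
      = (2 * n - 1).toNat := by simp
  have hidx : PySem.List.pyIdx? (2 * n - 1).toNat (-(j - 1) - 1)
      = some ((2 * n - 1).toNat - ((j - 1).toNat + 1)) := by
    unfold PySem.List.pyIdx?
    rw [if_neg (by omega), if_pos (by omega)]
    congr 1
    omega
  rw [show PySem.List.pySetD ((List.replicate (2 * n - 1).toNat " ").set (j - 1).toNat c)
        (-(j - 1) - 1) c
      = ((List.replicate (2 * n - 1).toNat " ").set (j - 1).toNat c).set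
          ((2 * n - 1).toNat - ((j - 1).toNat + 1)) c from by
    unfold PySem.List.pySetD PySem.List.pySet?
    rw [hlen, hidx]
    rfl]
  -- names for the relevant nat quantities
  generalize hA : (j - 1).toNat = a at *
  generalize hB : (2 * n - 1).toNat - (a + 1) = b
  -- decompose the double set on the replicate
  rw [show (2 * n - 1).toNat = a + 1 + ((2 * n - 1).toNat - a - 1) from by omega,
      rep_set]
  rw [List.set_append]
  rw [if_neg (by simp; omega)]
  simp only [List.length_replicate]
  by_cases hcase : j < n
  · -- two distinct positions a < b
    rw [if_pos (by omega : j - 1 < 2 * n - 1 - (j - 1) - 1)]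
    rw [show b - a = (b - a - 1) + 1 from by omega, List.set_cons_succ]
    rw [show (2 * n - 1).toNat - a - 1 = (b - a - 1) + 1 + a from by omega, rep_set]
    unfold PySem.Str.join
    congr 1
    rw [show (2 * n - 1 - 2 * (j - 1) - 2).toNat = b - a - 1 from by omega]
    simp [join_nil_flatten, List.map_replicate, hctl,
          show (" " : String).toList = [' '] from rfl]
  · -- single middle position: a = b, the two assignments coincide
    rw [if_neg (by omega : ¬ j - 1 < 2 * n - 1 - (j - 1) - 1)]
    rw [show b - a = 0 from by omega, List.set_cons_zero]
    rw [show (2 * n - 1).toNat - a - 1 = a from by omega]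
    unfold PySem.Str.join
    congr 1
    simp [join_nil_flatten, List.map_replicate, hctl,
          show (" " : String).toList = [' '] from rfl]

-- ===== VERDICT (by name: the statement is the Claim_ definition above) =====
theorem pattern_spec : Claim_equal_pattern := by
  intro n y _
  unfold Spec_pattern pattern pattern_alt
  simp only []
  rw [foldl_append_singleton, List.nil_append]
  rw [wave_eq n (max y 1) (by omega)]
  apply congrArg
  apply List.map_congr_left
  intro j hj
  rw [← wave_eq n (max y 1) (by omega)] at hj
  have := wave_mem n (max y 1) j (by omega) hj
  exact row_eq n j this.1 this.2
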